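-- pv_equiv track=rewrite | github.com/evgmaslov/car_design | generative_design/src/eval_utils.py | sample_with_drop
-- ===== SOURCE A (Python) =====
-- def sample_with_drop(samples):
--     results = [samples]
--     if len(samples) > 1:
--         for i in range(len(samples)):
--             toDrop = [s for s in samples]
--             toDrop.pop(i)
--             droppedResults = sample_with_drop(toDrop)
--             results.extend(droppedResults)
--     return results
-- ===== SOURCE B (Python) =====
-- def sample_with_drop(samples):
--     results = []
--     stack = [samples]
--     while stack:
--         node = stack.pop()
--         results.append(node)
--         if len(node) > 1:
--             children = [node[:i] + node[i + 1:] for i in range(len(node))]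
--             stack.extend(reversed(children))
--     return results
-- ===== Notes on version B (the rewrite author's own statement) =====
-- stated objective: alternative
-- what changed: A's recursion over leave-one-out sublists is replaced by an iterative preorder traversal with an explicit stack (pop a node, emit it, push its slice-built children in reverse), producing the same list without any recursion.
import Mathlib
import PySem

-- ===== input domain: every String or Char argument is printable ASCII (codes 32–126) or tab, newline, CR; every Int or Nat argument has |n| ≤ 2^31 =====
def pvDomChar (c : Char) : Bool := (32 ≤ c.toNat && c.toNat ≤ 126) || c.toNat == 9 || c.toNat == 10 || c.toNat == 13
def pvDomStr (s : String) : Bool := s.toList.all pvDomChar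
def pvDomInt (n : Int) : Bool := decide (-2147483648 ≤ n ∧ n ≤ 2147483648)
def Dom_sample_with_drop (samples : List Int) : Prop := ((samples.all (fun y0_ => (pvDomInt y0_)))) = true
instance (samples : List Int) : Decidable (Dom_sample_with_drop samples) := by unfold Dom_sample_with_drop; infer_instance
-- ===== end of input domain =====

-- B replaces A's recursion by an iterative preorder traversal with an explicit stack (alternative decomposition, same cost).

-- ===== PORT A =====
-- A's recursion, with a structural fuel argument for totality only: each recursive call is on a list
-- one element shorter, so fuel = samples.length always suffices and the 0-fuel arm is never reached.
def swdGo (fuel : Nat) (samples : List Int) : List (List Int) :=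
  match fuel with
  | 0 => [samples]
  | fuel + 1 =>
    -- results = [samples]; if len(samples) > 1: for i in range(len(samples)): results.extend(recurse on copy with index i popped)
    if samples.length > 1 then
      (List.range samples.length).foldl
        (fun res i => res ++ swdGo fuel (samples.eraseIdx i)) [samples]
    else [samples]

def sample_with_drop (samples : List Int) : List (List Int) :=
  swdGo samples.length samples

-- ===== PORT B =====
-- number of nodes the traversal emits for a list of length n (exact fuel for the while loop)
def swdCnt : Nat → Nat
  | 0 => 1
  | 1 => 1
  | (n + 2) => 1 + (n + 2) * swdCnt (n + 1)

-- the while loop: pop the top node, append it to results, push its slice-built children in reverse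
-- (head of the Lean list = top of the stack, so pushing reversed children = prepending them in order).
-- fuel counts loop iterations; swdCnt of the start length is exactly enough, the 0 arm is never reached.
def swdAltLoop (fuel : Nat) (stack : List (List Int)) (res : List (List Int)) : List (List Int) :=
  match fuel with
  | 0 => res
  | fuel + 1 =>
    match stack with
    | [] => res
    | node :: rest =>
      if node.length > 1 then
        swdAltLoop fuel
          (((List.range node.length).map (fun i => node.take i ++ node.drop (i + 1))) ++ rest)
          (res ++ [node])
      else swdAltLoop fuel rest (res ++ [node])

def sample_with_drop_alt (samples : List Int) : List (List Int) :=
  swdAltLoop (swdCnt samples.length) [samples] []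

-- ===== PRECONDITION & SPEC =====
def Spec_sample_with_drop (samples : List Int) (out : List (List Int)) : Prop := out = sample_with_drop_alt samples
instance (samples : List Int) (out : List (List Int)) : Decidable (Spec_sample_with_drop samples out) := by unfold Spec_sample_with_drop; infer_instance

-- ===== CLAIM (what is proved, stated in full; the proofs are below) =====
def Claim_equal_sample_with_drop : Prop := ∀ (samples : List Int), Dom_sample_with_drop samples → Spec_sample_with_drop samples (sample_with_drop samples)

-- ===== LEMMAS AND PROOFS =====

theorem swdCnt_pos (n : Nat) : 0 < swdCnt n := by
  match n with
  | 0 => simp [swdCnt]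
  | 1 => simp [swdCnt]
  | (n + 2) => simp [swdCnt]

theorem swdCnt_eq (n : Nat) (h : 1 < n) : swdCnt n = 1 + n * swdCnt (n - 1) := by
  match n with
  | (n + 2) => simp [swdCnt]

-- the recursive traversal of a node, with its exact fuel, in unfolded form
theorem swdGo_unfold (s : List Int) :
    swdGo s.length s =
      s :: (if s.length > 1 then
        (List.range s.length).flatMap (fun i => swdGo (s.eraseIdx i).length (s.eraseIdx i))
      else []) := by
  rcases hn : s.length with _ | m
  · simp [swdGo, hn]
  · rw [swdGo]
    simp only [hn]
    by_cases h : m + 1 > 1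
    · simp only [if_pos h]
      rw [PySem.List.foldl_append_eq_flatMap]
      have he : ∀ i ∈ List.range (m + 1),
          swdGo m (s.eraseIdx i) = swdGo (s.eraseIdx i).length (s.eraseIdx i) := by
        intro i hi
        simp only [List.mem_range] at hi
        have hl : (s.eraseIdx i).length = m := by
          simp [List.length_eraseIdx, hn]
          omega
        rw [hl]
      simp only [List.flatMap_def]
      rw [List.map_congr_left he]
      simp
    · have hm : m = 0 := by omega
      subst hm
      simp [hn]

-- the stack loop, given enough fuel, emits the full recursive traversal of each stacked node in order
theorem swdAltLoop_eq (fuel : Nat) (stack : List (List Int)) (res : List (List Int))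
    (hf : (stack.map (fun l => swdCnt l.length)).sum ≤ fuel) :
    swdAltLoop fuel stack res = res ++ (stack.map (fun l => swdGo l.length l)).flatten := by
  induction fuel generalizing stack res with
  | zero =>
    match stack with
    | [] => simp [swdAltLoop]
    | node :: rest =>
      exfalso
      have := swdCnt_pos node.length
      simp only [List.map_cons, List.sum_cons, Nat.le_zero] at hf
      omega
  | succ fuel ih =>
    match stack with
    | [] => simp [swdAltLoop]
    | node :: rest =>
      rw [swdAltLoop]
      split_ifs with h
      · have hlen : ∀ i ∈ List.range node.length,
            (node.take i ++ node.drop (i + 1)).length = node.length - 1 := by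
          intro i hi
          simp only [List.mem_range] at hi
          simp [List.length_take, List.length_drop]
          omega
        have hsum : (((List.range node.length).map (fun i => node.take i ++ node.drop (i + 1))).map
            (fun l => swdCnt l.length)).sum = node.length * swdCnt (node.length - 1) := by
          rw [List.map_map]
          rw [List.sum_eq_card_nsmul _ (swdCnt (node.length - 1)) ?_]
          · simp
          · intro x hx
            simp only [List.mem_map, Function.comp] at hx
            obtain ⟨i, hi, rfl⟩ := hx
            rw [hlen i hi]
        have hf' : ((((List.range node.length).map (fun i => node.take i ++ node.drop (i + 1))) ++ rest).map
            (fun l => swdCnt l.length)).sum ≤ fuel := by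
          simp only [List.map_append, List.sum_append, hsum]
          have := swdCnt_eq node.length h
          simp only [List.map_cons, List.sum_cons] at hf
          omega
        rw [ih _ _ hf']
        simp only [List.map_cons, List.flatten_cons]
        rw [swdGo_unfold node]
        simp only [h, if_pos]
        have heq : ∀ i ∈ List.range node.length,
            node.take i ++ node.drop (i + 1) = node.eraseIdx i := by
          intro i hi
          exact (List.eraseIdx_eq_take_drop_succ node i).symm
        simp [List.map_append, List.map_map, List.flatMap_def, Function.comp_def,
          List.map_congr_left heq]
      · have hf' : (rest.map (fun l => swdCnt l.length)).sum ≤ fuel := by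
          have := swdCnt_pos node.length
          simp only [List.map_cons, List.sum_cons] at hf
          omega
        rw [ih _ _ hf']
        simp only [List.map_cons, List.flatten_cons]
        rw [swdGo_unfold node]
        simp only [h, if_neg]
        simp

-- ===== VERDICT (by name: the statement is the Claim_ definition above) =====
theorem sample_with_drop_spec : Claim_equal_sample_with_drop := by
  intro samples _
  unfold Spec_sample_with_drop sample_with_drop_alt sample_with_drop
  rw [swdAltLoop_eq _ _ _ (by simp)]
  simp
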